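-- pv_equiv track=rewrite | github.com/galois-search/PythonProject3 | Legendre_sequence_generator.py | legendre_binary_sequence
-- ===== SOURCE A (Python) =====
-- def legendre_symbol(a, p):
--     """Compute the Legendre symbol (a/p)."""
--     a = a % p
--     if a == 0:
--         return 0
--     ls = pow(a, (p - 1) // 2, p)
--     if ls == 1:
--         return 1
--     elif ls == p - 1:
--         return -1
--     else:
--         return 0  # Shouldn't occur for primes
--
-- def legendre_binary_sequence(p):
--     """
--     Generate Legendre binary sequence of length p (p must be an odd prime).
--     Returns a list of 0s and 1s.
--     """
--     seq = []
--     for i in range(p):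
--         symbol = legendre_symbol(i, p)
--         if symbol == 1:
--             seq.append(1)
--         else:
--             seq.append(0)  # 0 for non-residue and zero
--     return seq
-- ===== SOURCE B (Python) =====
-- def legendre_binary_sequence(p):
--     """
--     Generate Legendre binary sequence of length p (p must be an odd prime).
--     Returns a list of 0s and 1s.
--
--     Sieve-based: a smallest-prime-factor sieve, one modular exponentiation per
--     prime index only; every composite index k gets its Euler-power value from
--     multiplicativity, pw[k] = pw[f] * pw[k//f] % p where f = spf[k].
--     """
--     if p <= 0:
--         return []
--     if p == 1:
--         return [0]
--     e = (p - 1) // 2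
--     spf = list(range(p))          # spf[k] -> smallest prime factor of k
--     i = 2
--     while i * i < p:
--         if spf[i] == i:
--             for j in range(i * i, p, i):
--                 if spf[j] == j:
--                     spf[j] = i
--         i += 1
--     pw = [0] * p                  # pw[k] = k**e % p for 1 <= k < p
--     pw[1] = 1 % p
--     out = [0, 1 if pw[1] == 1 else 0]
--     for k in range(2, p):
--         f = spf[k]
--         if f == k:
--             v = pow(k, e, p)
--         else:
--             v = pw[f] * pw[k // f] % p
--         pw[k] = v
--         out.append(1 if v == 1 else 0)
--     return out
-- ===== Notes on version B (the rewrite author's own statement) =====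
-- stated objective: faster
-- what changed: A calls a modular-exponentiation helper for every index i in range(p); B builds a smallest-prime-factor sieve once, does one modular exponentiation per PRIME index only, and fills every composite index in O(1) by multiplicativity pw[k] = pw[spf[k]] * pw[k//spf[k]] % p.
import Mathlib
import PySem

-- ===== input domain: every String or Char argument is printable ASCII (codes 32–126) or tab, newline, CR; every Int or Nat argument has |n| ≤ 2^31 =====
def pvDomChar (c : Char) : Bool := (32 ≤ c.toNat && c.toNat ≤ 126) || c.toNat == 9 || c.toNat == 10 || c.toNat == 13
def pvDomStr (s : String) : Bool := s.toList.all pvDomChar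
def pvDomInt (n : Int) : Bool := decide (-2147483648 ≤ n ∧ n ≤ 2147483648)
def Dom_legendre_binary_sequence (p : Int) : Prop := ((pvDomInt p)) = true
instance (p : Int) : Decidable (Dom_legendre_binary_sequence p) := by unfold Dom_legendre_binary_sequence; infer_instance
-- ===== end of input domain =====

-- B replaces A's per-index modular exponentiation by a smallest-prime-factor sieve:
-- one pow per prime index, composite indices get their value by multiplicativity
-- (objective: faster, fewer modular exponentiations).

-- ===== PORT A =====
-- Python's pow(a, e, p) with nonnegative exponent; A only calls this with positive p
-- (range(p) nonempty), so the exponent (p-1)//2 is nonnegative and `.toNat` is exact.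
def legendre_symbol (a p : Int) : Int :=
  let a' := PySem.Int.mod a p
  if a' = 0 then 0
  else
    let ls := PySem.Int.powMod a' (PySem.Int.floordiv (p - 1) 2).toNat p
    if ls = 1 then 1
    else if ls = p - 1 then -1
    else 0

def legendre_binary_sequence (p : Int) : List Int :=
  (PySem.List.pyRange 0 p 1).foldl (fun seq i =>
    let symbol := legendre_symbol i p
    if symbol = 1 then seq ++ [1] else seq ++ [0]) []

-- ===== PORT B =====
-- body of the inner sieve loop: 'if spf[j] == j: spf[j] = i'
def sieve_mark (i : Int) (s : List Int) (j : Int) : List Int :=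
  if PySem.List.pyGetD s j 0 = j then PySem.List.pySetD s j i else s

-- the 'while i * i < p' sieve loop of Source B, state spf
def spf_sieve (p i : Int) (spf : List Int) : List Int :=
  if _h : i * i < p then
    spf_sieve p (i + 1)
      (if PySem.List.pyGetD spf i 0 = i
       then (PySem.List.pyRange (i * i) p i).foldl (sieve_mark i) spf
       else spf)
  else spf
termination_by (p - i).toNat
decreasing_by
  have hii : i ≤ i * i := by rcases le_total i 0 with h | h <;> nlinarith
  omega

-- body of the main 'for k in range(2, p)' loop, state (pw, out); when reached, p ≥ 2,
-- so the exponent e = (p-1)//2 is nonnegative and `.toNat` is exact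
def legseq_val (p e : Int) (spf pw : List Int) (k : Int) : Int :=
  let f := PySem.List.pyGetD spf k 0
  if f = k then PySem.Int.powMod k e.toNat p
  else PySem.Int.mod
    (PySem.List.pyGetD pw f 0 * PySem.List.pyGetD pw (PySem.Int.floordiv k f) 0) p

def legseq_body (p e : Int) (spf : List Int) (st : List Int × List Int) (k : Int) :
    List Int × List Int :=
  let v := legseq_val p e spf st.1 k
  (PySem.List.pySetD st.1 k v, st.2 ++ [if v = 1 then (1 : Int) else 0])

def legendre_binary_sequence_alt (p : Int) : List Int :=
  if p ≤ 0 then []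
  else if p = 1 then [0]
  else
    let e := PySem.Int.floordiv (p - 1) 2
    let spf := spf_sieve p 2 (PySem.List.pyRange 0 p 1)
    let pw := PySem.List.pySetD (List.replicate p.toNat 0) 1 (PySem.Int.mod 1 p)
    let out : List Int := [0, if PySem.List.pyGetD pw 1 0 = 1 then 1 else 0]
    ((PySem.List.pyRange 2 p 1).foldl (legseq_body p e spf) (pw, out)).2

-- ===== PRECONDITION & SPEC =====
def Spec_legendre_binary_sequence (p : Int) (out : List Int) : Prop := out = legendre_binary_sequence_alt p
instance (p : Int) (out : List Int) : Decidable (Spec_legendre_binary_sequence p out) := by unfold Spec_legendre_binary_sequence; infer_instance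

-- ===== CLAIM (what is proved, stated in full; the proofs are below) =====
def Claim_equal_legendre_binary_sequence : Prop := ∀ (p : Int), Dom_legendre_binary_sequence p → Spec_legendre_binary_sequence p (legendre_binary_sequence p)

-- ===== LEMMAS AND PROOFS =====

-- invariant of the sieve: every entry is its own index, or a proper divisor ≥ 2 of it
def SpfOk (p : Int) (spf : List Int) : Prop :=
  spf.length = p.toNat ∧
  ∀ k : Int, 0 ≤ k → k < p →
    PySem.List.pyGetD spf k 0 = k ∨
    (PySem.List.pyGetD spf k 0 ∣ k ∧ 2 ≤ PySem.List.pyGetD spf k 0 ∧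
     PySem.List.pyGetD spf k 0 < k)

lemma pyGetD_int (xs : List Int) (k : Int) (h0 : 0 ≤ k) (hk : k.toNat < xs.length) :
    PySem.List.pyGetD xs k 0 = xs[k.toNat] :=
  PySem.List.pyGetD_eq_getElem xs 0 h0 (by omega)

lemma SpfOk_set (p i j : Int) (spf : List Int) (h : SpfOk p spf)
    (hdvd : i ∣ j) (hi2 : 2 ≤ i) (hij : i < j) (hj0 : 0 ≤ j) :
    SpfOk p (PySem.List.pySetD spf j i) := by
  obtain ⟨hlen, hinv⟩ := h
  rw [PySem.List.pySetD_of_nonneg _ _ hj0]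
  refine ⟨by simpa using hlen, ?_⟩
  intro k hk0 hkp
  have hkn : k.toNat < (spf.set j.toNat i).length := by simp [hlen]; omega
  rw [pyGetD_int _ k hk0 hkn]
  rw [List.getElem_set]
  by_cases hjk : j.toNat = k.toNat
  · have hjeq : j = k := by omega
    subst hjeq
    rw [if_pos rfl]
    exact Or.inr ⟨hdvd, hi2, hij⟩
  · rw [if_neg hjk]
    have hkn' : k.toNat < spf.length := by omega
    have := hinv k hk0 hkp
    rwa [pyGetD_int _ k hk0 hkn'] at this

lemma SpfOk_mark_fold (p i : Int) (hi2 : 2 ≤ i) :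
    ∀ (l : List Int) (spf : List Int),
    (∀ j ∈ l, i ∣ j ∧ i < j ∧ 0 ≤ j) → SpfOk p spf →
    SpfOk p (l.foldl (sieve_mark i) spf) := by
  intro l
  induction l with
  | nil => intro spf _ h; simpa using h
  | cons j t ih =>
    intro spf hmem h
    obtain ⟨hd, hlt, h0⟩ := hmem j (by simp)
    simp only [List.foldl_cons]
    apply ih
    · intro x hx; exact hmem x (by simp [hx])
    · unfold sieve_mark
      split_ifs with hg
      · exact SpfOk_set p i j spf h hd hi2 hlt h0
      · exact h

lemma spf_sieve_ok : ∀ (n : Nat) (p i : Int) (spf : List Int),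
    (p - i).toNat ≤ n → 2 ≤ i → SpfOk p spf → SpfOk p (spf_sieve p i spf) := by
  intro n
  induction n with
  | zero =>
    intro p i spf hfuel hi2 h
    have hnp : ¬ i * i < p := by
      intro hlt
      have hii : i ≤ i * i := by nlinarith
      omega
    rw [spf_sieve, dif_neg hnp]; exact h
  | succ n ih =>
    intro p i spf hfuel hi2 h
    by_cases hlt : i * i < p
    · have hii : i < i * i := by nlinarith
      rw [spf_sieve, dif_pos hlt]
      apply ih p (i + 1) _ (by omega) (by omega)
      split_ifs with hg
      · apply SpfOk_mark_fold p i hi2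
        · intro j hj
          have hmem := (PySem.List.mem_pyRange_iff_of_pos (by omega : (0:Int) < i) j).mp hj
          obtain ⟨h1, h2, h3⟩ := hmem
          refine ⟨?_, by nlinarith, by omega⟩
          have h4 : i ∣ i * i := ⟨i, rfl⟩
          have h5 := dvd_add h3 h4
          simpa using h5
        · exact h
      · exact h
    · rw [spf_sieve, dif_neg hlt]; exact h

-- what the main loop appends: the Euler-power test at every index of the range
lemma legseq_loop_out (p e : Int) (spf : List Int) (hp : 0 < p) (hspf : SpfOk p spf) :
    ∀ (n : Nat) (m : Int), 2 ≤ m → (p - m).toNat ≤ n →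
    ∀ (pw out : List Int), pw.length = p.toNat →
    (∀ k : Int, 1 ≤ k → k < m → PySem.List.pyGetD pw k 0 = (k ^ e.toNat) % p) →
    ((PySem.List.pyRange m p 1).foldl (legseq_body p e spf) (pw, out)).2
      = out ++ (PySem.List.pyRange m p 1).map
          (fun k => if (k ^ e.toNat) % p = 1 then (1 : Int) else 0) := by
  intro n
  induction n with
  | zero =>
    intro m hm2 hfuel pw out _ _
    have hmp : p ≤ m := by omega
    rw [PySem.List.pyRange_one_eq_nil hmp]; simp
  | succ n ih =>
    intro m hm2 hfuel pw out hlen hpw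
    by_cases hmp : m < p
    · rw [PySem.List.pyRange_one_cons hmp]
      simp only [List.foldl_cons, List.map_cons]
      -- evaluate the body at k = m
      have hval : legseq_val p e spf pw m = (m ^ e.toNat) % p := by
        simp only [legseq_val]
        rcases hspf.2 m (by omega) hmp with hfm | ⟨hdvd, hf2, hflt⟩
        · rw [if_pos hfm]
          unfold PySem.Int.powMod
          rw [PySem.Int.mod_eq_emod_of_pos hp]
        · set f := PySem.List.pyGetD spf m 0 with hf
          have hfne : ¬ f = m := by omega
          rw [if_neg hfne]
          have hq : PySem.Int.floordiv m f = m / f :=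
            PySem.Int.floordiv_eq_ediv_of_pos (by omega)
          have hqf : m / f * f = m := Int.ediv_mul_cancel hdvd
          set q := m / f with hqdef
          have hq1 : 1 ≤ q := by nlinarith
          have hqm : q < m := by nlinarith
          rw [hq, hpw f (by omega) (by omega), hpw q hq1 (by omega)]
          rw [PySem.Int.mod_eq_emod_of_pos hp]
          rw [← Int.mul_emod, ← mul_pow]
          rw [show f * q = m by rw [mul_comm]; exact hqf]
      have hv : (legseq_body p e spf (pw, out) m) =
          (PySem.List.pySetD pw m ((m ^ e.toNat) % p),
           out ++ [if (m ^ e.toNat) % p = 1 then (1 : Int) else 0]) := by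
        simp only [legseq_body, hval]
      rw [hv]
      rw [ih (m + 1) (by omega) (by omega)]
      · simp
      · rw [PySem.List.pySetD_of_nonneg _ _ (by omega : (0:Int) ≤ m)]
        simpa using hlen
      · intro k hk1 hkm1
        rw [PySem.List.pySetD_of_nonneg _ _ (by omega : (0:Int) ≤ m)]
        have hkn : k.toNat < (pw.set m.toNat ((m ^ e.toNat) % p)).length := by
          simp [hlen]; omega
        rw [pyGetD_int _ k (by omega) hkn, List.getElem_set]
        by_cases hkm : m.toNat = k.toNat
        · have : k = m := by omega
          subst this
          rw [if_pos hkm]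
        · rw [if_neg hkm]
          have := hpw k hk1 (by omega)
          rwa [pyGetD_int _ k (by omega) (by omega)] at this
    · rw [PySem.List.pyRange_one_eq_nil (by omega)]; simp

-- A written as a map over range(p)
lemma portA_map (p : Int) :
    legendre_binary_sequence p =
      (PySem.List.pyRange 0 p 1).map
        (fun i => if legendre_symbol i p = 1 then (1:Int) else 0) := by
  unfold legendre_binary_sequence
  have hf : (fun (seq : List Int) (i : Int) =>
        let symbol := legendre_symbol i p
        if symbol = 1 then seq ++ [1] else seq ++ [0]) =
      (fun seq i => seq ++ [if legendre_symbol i p = 1 then (1:Int) else 0]) := by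
    funext seq i
    by_cases h : legendre_symbol i p = 1 <;> simp [h]
  rw [hf, PySem.List.foldl_append_singleton_eq_map]
  simp

-- the per-index value A computes, for 0 ≤ i < p
lemma symbol_char (p i : Int) (hp : 0 < p) (h0 : 0 ≤ i) (hi : i < p) :
    (if legendre_symbol i p = 1 then (1:Int) else 0) =
      (if 0 < i ∧ (i ^ (PySem.Int.floordiv (p - 1) 2).toNat) % p = 1 then (1:Int) else 0) := by
  unfold legendre_symbol
  have hmi : PySem.Int.mod i p = i := by
    rw [PySem.Int.mod_eq_emod_of_pos hp, Int.emod_eq_of_lt h0 hi]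
  simp only [hmi]
  by_cases hz : i = 0
  · simp [hz]
  · have hpos : 0 < i := lt_of_le_of_ne h0 (Ne.symm hz)
    rw [if_neg hz]
    unfold PySem.Int.powMod
    rw [PySem.Int.mod_eq_emod_of_pos hp]
    by_cases hls : (i ^ (PySem.Int.floordiv (p - 1) 2).toNat) % p = 1
    · rw [if_pos hls, if_pos (show (1:Int) = 1 from rfl), if_pos (And.intro hpos hls)]
    · rw [if_neg hls]
      have hne : (if i ^ (PySem.Int.floordiv (p - 1) 2).toNat % p = p - 1
          then (-1:Int) else 0) ≠ 1 := by split <;> norm_num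
      rw [if_neg hne, if_neg (fun hc => hls hc.2)]

-- B written as the same map over range(p), for 2 ≤ p
lemma portB_map (p : Int) (hp2 : 2 ≤ p) :
    legendre_binary_sequence_alt p =
      (PySem.List.pyRange 0 p 1).map
        (fun i => if 0 < i ∧ (i ^ (PySem.Int.floordiv (p - 1) 2).toNat) % p = 1
                  then (1:Int) else 0) := by
  have hp : (0:Int) < p := by omega
  unfold legendre_binary_sequence_alt
  rw [if_neg (by omega : ¬ p ≤ 0), if_neg (by omega : ¬ p = 1)]
  set e := PySem.Int.floordiv (p - 1) 2 with hedef
  -- the initial spf list satisfies the invariant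
  have hspf0 : SpfOk p (PySem.List.pyRange 0 p 1) := by
    constructor
    · rw [PySem.List.length_pyRange_one]; omega
    · intro k hk0 hkp
      left
      have hkn : k.toNat < (PySem.List.pyRange 0 p 1).length := by
        rw [PySem.List.length_pyRange_one]; omega
      rw [pyGetD_int _ k hk0 hkn, PySem.List.getElem_pyRange_one]
      omega
  have hspf : SpfOk p (spf_sieve p 2 (PySem.List.pyRange 0 p 1)) :=
    spf_sieve_ok (p - 2).toNat p 2 _ le_rfl le_rfl hspf0
  -- the initial pw list: pw[1] = 1 % p = 1
  have h1p : PySem.Int.mod 1 p = 1 := by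
    rw [PySem.Int.mod_eq_emod_of_pos hp, Int.emod_eq_of_lt (by omega) (by omega)]
  have hpwlen : (PySem.List.pySetD (List.replicate p.toNat (0:Int)) 1 (PySem.Int.mod 1 p)).length
      = p.toNat := by
    rw [PySem.List.pySetD_of_nonneg _ _ (by omega : (0:Int) ≤ 1)]
    simp
  have hpw1 : PySem.List.pyGetD
      (PySem.List.pySetD (List.replicate p.toNat (0:Int)) 1 (PySem.Int.mod 1 p)) 1 0 = 1 := by
    rw [PySem.List.pySetD_of_nonneg _ _ (by omega : (0:Int) ≤ 1)]
    rw [pyGetD_int _ 1 (by omega) (by simp; omega)]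
    rw [List.getElem_set, if_pos rfl, h1p]
  have hinv : ∀ k : Int, 1 ≤ k → k < 2 →
      PySem.List.pyGetD
        (PySem.List.pySetD (List.replicate p.toNat (0:Int)) 1 (PySem.Int.mod 1 p)) k 0
        = (k ^ e.toNat) % p := by
    intro k hk1 hk2
    have : k = 1 := by omega
    subst this
    rw [hpw1, one_pow, Int.emod_eq_of_lt (by omega) (by omega)]
  rw [legseq_loop_out p e _ hp hspf (p - 2).toNat 2 le_rfl le_rfl _ _ hpwlen hinv]
  rw [hpw1, if_pos rfl]
  -- split range(p) as [0, 1] ++ range(2, p)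
  rw [PySem.List.pyRange_one_append 0 2 p (by omega) hp2]
  rw [show PySem.List.pyRange 0 2 1 = [0, 1] from by decide]
  simp only [List.map_append, List.map_cons, List.map_nil]
  have h1e : ((1:Int) ^ e.toNat) % p = 1 := by
    rw [one_pow, Int.emod_eq_of_lt (by omega) (by omega)]
  rw [show (if (0:Int) < 0 ∧ ((0:Int) ^ e.toNat) % p = 1 then (1:Int) else 0) = 0 from by
    rw [if_neg]; rintro ⟨h, -⟩; exact absurd h (by omega)]
  rw [show (if (0:Int) < 1 ∧ ((1:Int) ^ e.toNat) % p = 1 then (1:Int) else 0) = 1 from by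
    rw [if_pos ⟨by omega, h1e⟩]]
  congr 1
  apply List.map_congr_left
  intro k hk
  obtain ⟨hk2, hkp⟩ := PySem.List.mem_pyRange_one.mp hk
  by_cases h : (k ^ e.toNat) % p = 1
  · rw [if_pos h, if_pos ⟨by omega, h⟩]
  · rw [if_neg h, if_neg (fun hc => h hc.2)]

-- ===== VERDICT (by name: the statement is the Claim_ definition above) =====
theorem legendre_binary_sequence_spec : Claim_equal_legendre_binary_sequence := by
  intro p _
  unfold Spec_legendre_binary_sequence
  by_cases hp2 : 2 ≤ p
  · rw [portA_map, portB_map p hp2]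
    apply List.map_congr_left
    intro i hi
    obtain ⟨hi0, hip⟩ := PySem.List.mem_pyRange_one.mp hi
    exact symbol_char p i (by omega) hi0 hip
  · by_cases h1 : p = 1
    · subst h1; decide
    · have hple : p ≤ 0 := by omega
      rw [portA_map, PySem.List.pyRange_one_eq_nil hple]
      simp [legendre_binary_sequence_alt, hple]
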